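-- pv_equiv track=rewrite | github.com/ncRNA-lab/Cucurbit_lncRNAs_landscape | Scripts/11-Comparative_genomics/Additional_scripts/Synteny_analysis.py | DictOfClusters
-- ===== SOURCE A (Python) =====
-- def DictOfClusters (myidx, mylist, genesNearby):
--
--     mydict = {}
--
--     for idx in myidx:
--         key = mylist[idx]
--         val = {'left':[], 'right':[], 'all':[]}
--         if not key in mydict:
--             mydict[key] = val
--         i = 1
--         while i <= genesNearby:
--             try:
--                 if idx - i >= 0:
--                     mydict[key]['left'].append(mylist[idx - i])
--                     mydict[key]['all'].append(mylist[idx - i])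
--                 mydict[key]['right'].append(mylist[idx + i])
--                 mydict[key]['all'].append(mylist[idx + i])
--             except IndexError:
--                 pass
--             i += 1
--
--     return mydict
-- ===== SOURCE B (Python) =====
-- def _interleave(xs, ys):
--     # merge two positional lists: xs[0], ys[0], xs[1], ys[1], ...
--     if not xs:
--         return list(ys)
--     if not ys:
--         return list(xs)
--     return [xs[0], ys[0]] + _interleave(xs[1:], ys[1:])
--
--
-- def DictOfClusters(myidx, mylist, genesNearby):
--     n = len(mylist)
--     mydict = {}
--     for idx in myidx:
--         entry = mydict.setdefault(mylist[idx], {'left': [], 'right': [], 'all': []})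
--         # left neighbours exist only at non-negative positions idx-i
--         left = [mylist[idx - i] for i in range(1, genesNearby + 1) if idx - i >= 0]
--         # idx+i never drops below -n, so Python's indexing resolves it; only the top is clipped
--         right = [mylist[idx + i] for i in range(1, genesNearby + 1) if idx + i < n]
--         entry['left'].extend(left)
--         entry['right'].extend(right)
--         entry['all'].extend(_interleave(left, right))
--     return mydict
-- ===== Notes on version B (the rewrite author's own statement) =====
-- stated objective: simpler
-- what changed: Replaces A's exception-driven while/try/except loop that mutates the nested dict one neighbour at a time with per-index list comprehensions for the left and right neighbour lists plus a recursive interleave merge for 'all', stored once via setdefault/extend.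
import Mathlib
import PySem

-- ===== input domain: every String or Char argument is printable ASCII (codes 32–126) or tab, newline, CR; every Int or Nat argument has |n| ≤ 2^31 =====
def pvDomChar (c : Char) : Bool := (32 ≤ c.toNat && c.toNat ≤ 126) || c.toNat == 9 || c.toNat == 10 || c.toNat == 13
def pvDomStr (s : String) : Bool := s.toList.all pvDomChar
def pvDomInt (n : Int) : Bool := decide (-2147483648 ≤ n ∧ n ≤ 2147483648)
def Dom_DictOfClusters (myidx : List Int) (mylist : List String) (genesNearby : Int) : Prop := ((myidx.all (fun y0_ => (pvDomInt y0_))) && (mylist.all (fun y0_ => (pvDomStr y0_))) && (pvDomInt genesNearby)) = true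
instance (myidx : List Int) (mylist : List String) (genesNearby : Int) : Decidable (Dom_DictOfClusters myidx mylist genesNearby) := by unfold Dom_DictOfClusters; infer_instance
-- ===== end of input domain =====

-- B replaces A's exception-driven while/try neighbour scan with per-index comprehensions for
-- left/right plus a recursive interleave merge for 'all' (objective: simpler decomposition).

-- ===== PORT A =====
-- the fresh value {'left':[], 'right':[], 'all':[]}
def pvEntry0 : PySem.Dict String (List String) :=
  PySem.Dict.ofList [("left", []), ("right", []), ("all", [])]

-- the try-block of one while iteration; 'none' from pyGet? is the IndexError: the rest of
-- the block is skipped (except: pass)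
def pvARight (mylist : List String) (idx i : Int) (key : String)
    (d : PySem.Dict String (PySem.Dict String (List String))) :
    PySem.Dict String (PySem.Dict String (List String)) :=
  match PySem.List.pyGet? mylist (idx + i) with
  | none => d
  | some R =>
      let d := d.modify key PySem.Dict.empty (fun e => e.modify "right" [] (· ++ [R]))
      d.modify key PySem.Dict.empty (fun e => e.modify "all" [] (· ++ [R]))

def pvATry (mylist : List String) (idx i : Int) (key : String)
    (d : PySem.Dict String (PySem.Dict String (List String))) :
    PySem.Dict String (PySem.Dict String (List String)) :=
  if idx - i ≥ 0 then
    match PySem.List.pyGet? mylist (idx - i) with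
    | none => d
    | some L =>
        let d := d.modify key PySem.Dict.empty (fun e => e.modify "left" [] (· ++ [L]))
        let d := d.modify key PySem.Dict.empty (fun e => e.modify "all" [] (· ++ [L]))
        pvARight mylist idx i key d
  else pvARight mylist idx i key d

-- while i <= genesNearby: ... ; i += 1
def pvAWhile (mylist : List String) (idx g : Int) (key : String) (i : Int)
    (d : PySem.Dict String (PySem.Dict String (List String))) :
    PySem.Dict String (PySem.Dict String (List String)) :=
  if i ≤ g then pvAWhile mylist idx g key (i + 1) (pvATry mylist idx i key d) else d
termination_by (g + 1 - i).toNat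
decreasing_by omega

def DictOfClusters (myidx : List Int) (mylist : List String) (genesNearby : Int) :
    List (String × List (String × List String)) :=
  (myidx.foldl (fun d idx =>
      -- key = mylist[idx]; an IndexError here is excluded by Pre_
      let key := (PySem.List.pyGet? mylist idx).getD ""
      let d := if d.contains key then d else d.insert key pvEntry0
      pvAWhile mylist idx genesNearby key 1 d)
    PySem.Dict.empty).items.map (fun p => (p.1, p.2.items))

-- ===== PORT B =====
def pvInterleave : List String → List String → List String
  | [], ys => ys
  | xs, [] => xs
  | x :: xs, y :: ys => x :: y :: pvInterleave xs ys

def DictOfClusters_alt (myidx : List Int) (mylist : List String) (genesNearby : Int) :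
    List (String × List (String × List String)) :=
  let n : Int := mylist.length
  (myidx.foldl (fun d idx =>
      -- mylist[idx]; an IndexError here is excluded by Pre_
      let key := (PySem.List.pyGet? mylist idx).getD ""
      let d := d.setdefault key (PySem.Dict.ofList [("left", []), ("right", []), ("all", [])])
      let left := ((PySem.List.pyRange 1 (genesNearby + 1) 1).filter (fun i => idx - i ≥ 0)).map
        (fun i => (PySem.List.pyGet? mylist (idx - i)).getD "")
      let right := ((PySem.List.pyRange 1 (genesNearby + 1) 1).filter (fun i => idx + i < n)).map
        (fun i => (PySem.List.pyGet? mylist (idx + i)).getD "")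
      let d := d.modify key PySem.Dict.empty (fun e => e.modify "left" [] (· ++ left))
      let d := d.modify key PySem.Dict.empty (fun e => e.modify "right" [] (· ++ right))
      d.modify key PySem.Dict.empty (fun e => e.modify "all" [] (· ++ pvInterleave left right)))
    PySem.Dict.empty).items.map (fun p => (p.1, p.2.items))

-- ===== PRECONDITION & SPEC =====
-- Pre_ excludes exactly the inputs where A raises IndexError: some idx out of Python's index
-- range for mylist (the key lookup mylist[idx] is the only uncaught access).
def Pre_DictOfClusters (myidx : List Int) (mylist : List String) (genesNearby : Int) : Prop :=
  ∀ idx ∈ myidx, PySem.Raise.InRange mylist.length idx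
instance (myidx : List Int) (mylist : List String) (genesNearby : Int) : Decidable (Pre_DictOfClusters myidx mylist genesNearby) := by unfold Pre_DictOfClusters; infer_instance

def pvWitness_DictOfClusters : List Int × List String × Int := ([0, -1, 1], ["a", "b"], 2)

def Spec_DictOfClusters (myidx : List Int) (mylist : List String) (genesNearby : Int) (out : List (String × List (String × List String))) : Prop := out = DictOfClusters_alt myidx mylist genesNearby
instance (myidx : List Int) (mylist : List String) (genesNearby : Int) (out : List (String × List (String × List String))) : Decidable (Spec_DictOfClusters myidx mylist genesNearby out) := by unfold Spec_DictOfClusters; infer_instance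

-- ===== CLAIM (what is proved, stated in full; the proofs are below) =====
def Claim_equal_DictOfClusters : Prop := ∀ (myidx : List Int) (mylist : List String) (genesNearby : Int), Dom_DictOfClusters myidx mylist genesNearby → Pre_DictOfClusters myidx mylist genesNearby → Spec_DictOfClusters myidx mylist genesNearby (DictOfClusters myidx mylist genesNearby)

-- ===== LEMMAS AND PROOFS =====

-- entry-level mirror of one while-iteration of A (used only by the proofs)
def pvERight (mylist : List String) (idx i : Int) (e : PySem.Dict String (List String)) :
    PySem.Dict String (List String) :=
  match PySem.List.pyGet? mylist (idx + i) with
  | none => e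
  | some R => (e.modify "right" [] (· ++ [R])).modify "all" [] (· ++ [R])

def pvEStep (mylist : List String) (idx i : Int) (e : PySem.Dict String (List String)) :
    PySem.Dict String (List String) :=
  if idx - i ≥ 0 then
    match PySem.List.pyGet? mylist (idx - i) with
    | none => e
    | some L => pvERight mylist idx i ((e.modify "left" [] (· ++ [L])).modify "all" [] (· ++ [L]))
  else pvERight mylist idx i e

def pvEWhile (mylist : List String) (idx g i : Int) (e : PySem.Dict String (List String)) :
    PySem.Dict String (List String) :=
  if i ≤ g then pvEWhile mylist idx g (i + 1) (pvEStep mylist idx i e) else e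
termination_by (g + 1 - i).toNat
decreasing_by omega

-- the left / right neighbour lists collected from step i on
def pvL (mylist : List String) (idx g i : Int) : List String :=
  ((PySem.List.pyRange i (g + 1) 1).filter (fun j => idx - j ≥ 0)).map
    (fun j => (PySem.List.pyGet? mylist (idx - j)).getD "")
def pvR (mylist : List String) (idx g i : Int) : List String :=
  ((PySem.List.pyRange i (g + 1) 1).filter (fun j => idx + j < (mylist.length : Int))).map
    (fun j => (PySem.List.pyGet? mylist (idx + j)).getD "")

def pvShape (v : PySem.Dict String (List String)) : Prop :=
  ∃ l r a, v = PySem.Dict.mk [("left", l), ("right", r), ("all", a)]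

def pvInv (d : PySem.Dict String (PySem.Dict String (List String))) : Prop :=
  d.keys.Nodup ∧ ∀ v ∈ d.values, pvShape v

theorem pv_modify_modify_self (d : PySem.Dict String (PySem.Dict String (List String)))
    (k : String) (dflt : PySem.Dict String (List String)) (f g) :
    (d.modify k dflt f).modify k dflt g = d.modify k dflt (fun v => g (f v)) := by
  simp [PySem.Dict.modify, PySem.Dict.getD_insert_self, PySem.Dict.insert_insert_self]

theorem pv_insert_getD_self (d : PySem.Dict String (PySem.Dict String (List String)))
    (k : String) (dflt) (hc : d.contains k = true) (hnd : d.keys.Nodup) :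
    d.insert k (d.getD k dflt) = d := by
  apply PySem.Dict.ext
  rw [PySem.Dict.items_insert_of_contains _ _ hc]
  conv_rhs => rw [← List.map_id d.items]
  apply List.map_congr_left
  intro p hp
  by_cases h : p.1 = k
  · have hmem : (k, p.2) ∈ d.items := by rwa [← h, Prod.mk.eta]
    have := PySem.Dict.getD_of_mem_items d hmem hnd dflt
    simp [h, this]
    exact h ▸ Prod.mk.eta
  · simp [h]

theorem pv_modify_id (d : PySem.Dict String (PySem.Dict String (List String)))
    (k : String) (dflt) (hc : d.contains k = true) (hnd : d.keys.Nodup) :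
    d.modify k dflt (fun v => v) = d := by
  simpa [PySem.Dict.modify] using pv_insert_getD_self d k dflt hc hnd

theorem pv_try_eq (mylist : List String) (idx i : Int) (key : String) (d)
    (hc : d.contains key = true) (hnd : d.keys.Nodup) :
    pvATry mylist idx i key d = d.modify key PySem.Dict.empty (pvEStep mylist idx i) := by
  unfold pvATry pvEStep pvARight pvERight
  split
  · rcases h : PySem.List.pyGet? mylist (idx - i) with _ | L
    · exact (pv_modify_id d key _ hc hnd).symm
    · rcases hR : PySem.List.pyGet? mylist (idx + i) with _ | R
      · simp only [pv_modify_modify_self]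
      · simp only [pv_modify_modify_self]
  · rcases hR : PySem.List.pyGet? mylist (idx + i) with _ | R
    · exact (pv_modify_id d key _ hc hnd).symm
    · simp only [pv_modify_modify_self]

theorem pv_while_eq (mylist : List String) (idx g : Int) (key : String) (i : Int) (d)
    (hc : d.contains key = true) (hnd : d.keys.Nodup) :
    pvAWhile mylist idx g key i d = d.modify key PySem.Dict.empty (pvEWhile mylist idx g i) := by
  rw [pvAWhile]
  by_cases h : i ≤ g
  · have hc' : (pvATry mylist idx i key d).contains key = true := by
      rw [pv_try_eq mylist idx i key d hc hnd]
      simp [PySem.Dict.contains_modify, hc]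
    have hnd' : (pvATry mylist idx i key d).keys.Nodup := by
      rw [pv_try_eq mylist idx i key d hc hnd, PySem.Dict.modify]
      exact PySem.Dict.nodup_keys_insert _ _ _ hnd
    simp only [h, if_true]
    rw [pv_while_eq mylist idx g key (i + 1) (pvATry mylist idx i key d) hc' hnd']
    rw [pv_try_eq mylist idx i key d hc hnd, pv_modify_modify_self]
    have : pvEWhile mylist idx g i = fun e => pvEWhile mylist idx g (i + 1) (pvEStep mylist idx i e) := by
      funext e; rw [pvEWhile]; simp [h]
    rw [this]
  · simp only [h, if_false]
    have : pvEWhile mylist idx g i = fun e => e := by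
      funext e; rw [pvEWhile]; simp [h]
    rw [this]
    exact (pv_modify_id d key _ hc hnd).symm
termination_by (g + 1 - i).toNat
decreasing_by omega

theorem pvL_nil (mylist : List String) (idx g i : Int) (h : idx < i) :
    pvL mylist idx g i = [] := by
  unfold pvL
  simp only [List.map_eq_nil_iff, List.filter_eq_nil_iff]
  intro j hj
  have := PySem.List.mem_pyRange_one.mp hj
  simp only [decide_eq_true_eq]
  omega

theorem pvR_nil (mylist : List String) (idx g i : Int) (h : (mylist.length : Int) ≤ idx + i) :
    pvR mylist idx g i = [] := by
  unfold pvR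
  simp only [List.map_eq_nil_iff, List.filter_eq_nil_iff]
  intro j hj
  have := PySem.List.mem_pyRange_one.mp hj
  simp only [decide_eq_true_eq]
  omega

theorem pv_range_nil (i j : Int) (h : j ≤ i) : PySem.List.pyRange i j 1 = [] :=
  List.eq_nil_iff_forall_not_mem.mpr (fun x hx => by
    have := PySem.List.mem_pyRange_one.mp hx; omega)

theorem pvL_cons (mylist : List String) (idx g i : Int) (h : i ≤ g) :
    pvL mylist idx g i =
      (if idx - i ≥ 0 then [(PySem.List.pyGet? mylist (idx - i)).getD ""] else []) ++
        pvL mylist idx g (i + 1) := by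
  unfold pvL
  rw [PySem.List.pyRange_one_cons (by omega : i < g + 1)]
  simp only [ge_iff_le, sub_nonneg, List.filter_cons]
  by_cases h1 : i ≤ idx <;> simp [h1]

theorem pvR_cons (mylist : List String) (idx g i : Int) (h : i ≤ g) :
    pvR mylist idx g i =
      (if idx + i < (mylist.length : Int) then [(PySem.List.pyGet? mylist (idx + i)).getD ""] else []) ++
        pvR mylist idx g (i + 1) := by
  unfold pvR
  rw [PySem.List.pyRange_one_cons (by omega : i < g + 1)]
  by_cases h1 : idx + i < (mylist.length : Int) <;> simp [h1]

theorem pv_estep_mk (mylist : List String) (idx i : Int)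
    (hlo : -(mylist.length : Int) ≤ idx) (hhi : idx < (mylist.length : Int)) (hi : 1 ≤ i)
    (l r a : List String) :
    pvEStep mylist idx i (PySem.Dict.mk [("left", l), ("right", r), ("all", a)]) =
      PySem.Dict.mk [
        ("left", l ++ (if idx - i ≥ 0 then [(PySem.List.pyGet? mylist (idx - i)).getD ""] else [])),
        ("right", r ++ (if idx + i < (mylist.length : Int) then [(PySem.List.pyGet? mylist (idx + i)).getD ""] else [])),
        ("all", a ++ (if idx - i ≥ 0 then [(PySem.List.pyGet? mylist (idx - i)).getD ""] else [])
             ++ (if idx + i < (mylist.length : Int) then [(PySem.List.pyGet? mylist (idx + i)).getD ""] else []))] := by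
  have hR : ∀ (hR : idx + i < (mylist.length : Int)), ∃ v, PySem.List.pyGet? mylist (idx + i) = some v := by
    intro hRlt
    rcases hv : PySem.List.pyGet? mylist (idx + i) with _ | v
    · rw [PySem.List.pyGet?_eq_none_iff] at hv
      exact absurd (by unfold PySem.Raise.InRange; omega) hv
    · exact ⟨v, rfl⟩
  have hRn : ∀ (hR : ¬ idx + i < (mylist.length : Int)), PySem.List.pyGet? mylist (idx + i) = none := by
    intro hge
    rw [PySem.List.pyGet?_eq_none_iff]
    unfold PySem.Raise.InRange; omega
  unfold pvEStep pvERight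
  by_cases h1 : idx - i ≥ 0
  · have : ∃ v, PySem.List.pyGet? mylist (idx - i) = some v := by
      rcases hv : PySem.List.pyGet? mylist (idx - i) with _ | v
      · rw [PySem.List.pyGet?_eq_none_iff] at hv
        exact absurd (by unfold PySem.Raise.InRange; omega) hv
      · exact ⟨v, rfl⟩
    obtain ⟨L, hL⟩ := this
    simp only [h1, if_true, hL]
    by_cases h2 : idx + i < (mylist.length : Int)
    · obtain ⟨R, hRv⟩ := hR h2
      simp only [hRv, h2, if_true]
      simp [PySem.Dict.modify, PySem.Dict.insert, PySem.Dict.getD, PySem.Dict.get?_mk_cons,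
        PySem.Dict.contains_mk]
    · simp only [hRn h2, h2, if_false]
      simp [PySem.Dict.modify, PySem.Dict.insert, PySem.Dict.getD, PySem.Dict.get?_mk_cons,
        PySem.Dict.contains_mk]
  · simp only [h1, if_false]
    by_cases h2 : idx + i < (mylist.length : Int)
    · obtain ⟨R, hRv⟩ := hR h2
      simp only [hRv, h2, if_true]
      simp [PySem.Dict.modify, PySem.Dict.insert, PySem.Dict.getD, PySem.Dict.get?_mk_cons,
        PySem.Dict.contains_mk]
    · simp only [hRn h2, h2, if_false]
      simp

theorem pv_ewhile_spec (mylist : List String) (idx g : Int)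
    (hlo : -(mylist.length : Int) ≤ idx) (hhi : idx < (mylist.length : Int))
    (i : Int) (hi : 1 ≤ i) (l r a : List String) :
      pvEWhile mylist idx g i (PySem.Dict.mk [("left", l), ("right", r), ("all", a)]) =
        PySem.Dict.mk [("left", l ++ pvL mylist idx g i), ("right", r ++ pvR mylist idx g i),
          ("all", a ++ pvInterleave (pvL mylist idx g i) (pvR mylist idx g i))] := by
  rw [pvEWhile]
  by_cases h : i ≤ g
  · simp only [h, if_true]
    rw [pv_estep_mk mylist idx i hlo hhi hi l r a,
        pv_ewhile_spec mylist idx g hlo hhi (i + 1) (by omega)]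
    rw [pvL_cons mylist idx g i h, pvR_cons mylist idx g i h]
    simp only [ge_iff_le, sub_nonneg]
    by_cases h1 : i ≤ idx <;> by_cases h2 : idx + i < (mylist.length : Int)
    · simp [h1, h2, pvInterleave]
    · rw [pvR_nil mylist idx g (i + 1) (by omega)]
      simp only [h1, h2, if_true, if_false, List.append_nil]
      cases pvL mylist idx g (i + 1) <;> simp [pvInterleave]
    · rw [pvL_nil mylist idx g (i + 1) (by omega)]
      simp [h1, h2, pvInterleave]
    · rw [pvL_nil mylist idx g (i + 1) (by omega), pvR_nil mylist idx g (i + 1) (by omega)]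
      simp [h1, h2, pvInterleave]
  · simp only [h, if_false]
    unfold pvL pvR
    rw [pv_range_nil i (g + 1) (by omega)]
    simp [pvInterleave]
termination_by (g + 1 - i).toNat
decreasing_by omega

theorem pv_step_eq (mylist : List String) (g : Int) (idx : Int) (d)
    (hinv : pvInv d) (hin : PySem.Raise.InRange mylist.length idx) :
    (let key := (PySem.List.pyGet? mylist idx).getD ""
     let d1 := if d.contains key then d else d.insert key pvEntry0
     pvAWhile mylist idx g key 1 d1) =
    (let key := (PySem.List.pyGet? mylist idx).getD ""
     let d1 := d.setdefault key (PySem.Dict.ofList [("left", []), ("right", []), ("all", [])])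
     let left := pvL mylist idx g 1
     let right := pvR mylist idx g 1
     let d2 := d1.modify key PySem.Dict.empty (fun e => e.modify "left" [] (· ++ left))
     let d3 := d2.modify key PySem.Dict.empty (fun e => e.modify "right" [] (· ++ right))
     d3.modify key PySem.Dict.empty (fun e => e.modify "all" [] (· ++ pvInterleave left right))) := by
  obtain ⟨hnd, hshape⟩ := hinv
  have hlo : -(mylist.length : Int) ≤ idx := by unfold PySem.Raise.InRange at hin; omega
  have hhi : idx < (mylist.length : Int) := by unfold PySem.Raise.InRange at hin; omega
  simp only []
  set key := (PySem.List.pyGet? mylist idx).getD "" with hkey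
  have hof : PySem.Dict.ofList [("left", ([] : List String)), ("right", []), ("all", [])] = pvEntry0 := rfl
  rw [hof]
  -- the state after the key-initialisation step is the same on both sides, and its entry at key is shaped
  have hmain : ∀ (d1 : PySem.Dict String (PySem.Dict String (List String))),
      d1.contains key = true → d1.keys.Nodup → pvShape (d1.getD key PySem.Dict.empty) →
      pvAWhile mylist idx g key 1 d1 =
        ((d1.modify key PySem.Dict.empty (fun e => e.modify "left" [] (· ++ pvL mylist idx g 1))).modify
            key PySem.Dict.empty (fun e => e.modify "right" [] (· ++ pvR mylist idx g 1))).modify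
          key PySem.Dict.empty
          (fun e => e.modify "all" [] (· ++ pvInterleave (pvL mylist idx g 1) (pvR mylist idx g 1))) := by
    intro d1 hc1 hnd1 hs1
    rw [pv_while_eq mylist idx g key 1 d1 hc1 hnd1, pv_modify_modify_self, pv_modify_modify_self]
    obtain ⟨l, r, a, he⟩ := hs1
    show d1.insert key _ = d1.insert key _
    congr 1
    rw [PySem.Dict.getD] at he ⊢
    rw [he, pv_ewhile_spec mylist idx g hlo hhi 1 (by omega) l r a]
    simp [PySem.Dict.modify, PySem.Dict.insert, PySem.Dict.getD, PySem.Dict.get?_mk_cons,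
      PySem.Dict.contains_mk]
  by_cases hck : d.contains key
  · rw [if_pos hck, PySem.Dict.setdefault_of_contains d pvEntry0 hck]
    apply hmain d hck hnd
    have hg : ∃ v, d.get? key = some v := by
      rw [← Option.isSome_iff_exists, ← PySem.Dict.contains_eq_isSome_get?]; exact hck
    obtain ⟨v, hv⟩ := hg
    have hval : v ∈ d.values := by
      have := PySem.Dict.mem_items_of_get?_eq_some d hv
      simp only [PySem.Dict.values]
      exact List.mem_map_of_mem this
    rw [PySem.Dict.getD, hv]
    exact hshape v hval
  · rw [if_neg hck, PySem.Dict.setdefault_of_not_contains d pvEntry0 (by simpa using hck)]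
    apply hmain _ (PySem.Dict.contains_insert_self d key pvEntry0) (PySem.Dict.nodup_keys_insert d key pvEntry0 hnd)
    rw [PySem.Dict.getD, PySem.Dict.get?_insert_self]
    exact ⟨[], [], [], rfl⟩

theorem pv_step_inv (mylist : List String) (g : Int) (idx : Int) (d)
    (hinv : pvInv d) (hin : PySem.Raise.InRange mylist.length idx) :
    pvInv (let key := (PySem.List.pyGet? mylist idx).getD ""
           let d1 := if d.contains key then d else d.insert key pvEntry0
           pvAWhile mylist idx g key 1 d1) := by
  obtain ⟨hnd, hshape⟩ := hinv
  rw [pv_step_eq mylist g idx d ⟨hnd, hshape⟩ hin]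
  simp only []
  set key := (PySem.List.pyGet? mylist idx).getD "" with hkey
  have hmain : ∀ (d1 : PySem.Dict String (PySem.Dict String (List String))),
      d1.contains key = true → d1.keys.Nodup → (∀ v ∈ d1.values, pvShape v) →
      pvInv (((d1.modify key PySem.Dict.empty (fun e => e.modify "left" [] (· ++ pvL mylist idx g 1))).modify
            key PySem.Dict.empty (fun e => e.modify "right" [] (· ++ pvR mylist idx g 1))).modify
          key PySem.Dict.empty
          (fun e => e.modify "all" [] (· ++ pvInterleave (pvL mylist idx g 1) (pvR mylist idx g 1)))) := by
    intro d1 hc1 hnd1 hvs1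
    have hs1 : pvShape (d1.getD key PySem.Dict.empty) := by
      have hg : ∃ v, d1.get? key = some v := by
        rw [← Option.isSome_iff_exists, ← PySem.Dict.contains_eq_isSome_get?]; exact hc1
      obtain ⟨v, hv⟩ := hg
      have hval : v ∈ d1.values := by
        have := PySem.Dict.mem_items_of_get?_eq_some d1 hv
        simp only [PySem.Dict.values]
        exact List.mem_map_of_mem this
      rw [PySem.Dict.getD, hv]
      exact hvs1 v hval
    rw [pv_modify_modify_self, pv_modify_modify_self]
    obtain ⟨l, r, a, he⟩ := hs1
    constructor
    · rw [PySem.Dict.modify]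
      exact PySem.Dict.nodup_keys_insert _ _ _ hnd1
    · intro v hv
      rw [PySem.Dict.modify] at hv
      rcases PySem.Dict.mem_values_insert d1 key _ v hv with h | h
      · rw [h, he]
        simp only [pvShape]
        simp [PySem.Dict.modify, PySem.Dict.insert, PySem.Dict.getD, PySem.Dict.get?_mk_cons,
          PySem.Dict.contains_mk]
      · exact hvs1 v h
  by_cases hck : d.contains key
  · rw [PySem.Dict.setdefault_of_contains d _ hck]
    exact hmain d hck hnd hshape
  · rw [PySem.Dict.setdefault_of_not_contains d _ (by simpa using hck)]
    refine hmain _ (PySem.Dict.contains_insert_self d key _) (PySem.Dict.nodup_keys_insert d key _ hnd) ?_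
    intro v hv
    rcases PySem.Dict.mem_values_insert d key _ v hv with h | h
    · rw [h]
      exact ⟨[], [], [], rfl⟩
    · exact hshape v h

theorem pv_fold_eq (mylist : List String) (g : Int) :
    ∀ (myidx : List Int) (d : PySem.Dict String (PySem.Dict String (List String))),
      pvInv d → (∀ idx ∈ myidx, PySem.Raise.InRange mylist.length idx) →
      myidx.foldl (fun d idx =>
        let key := (PySem.List.pyGet? mylist idx).getD ""
        let d := if d.contains key then d else d.insert key pvEntry0
        pvAWhile mylist idx g key 1 d) d =
      myidx.foldl (fun d idx =>
        let key := (PySem.List.pyGet? mylist idx).getD ""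
        let d := d.setdefault key (PySem.Dict.ofList [("left", []), ("right", []), ("all", [])])
        let left := pvL mylist idx g 1
        let right := pvR mylist idx g 1
        let d := d.modify key PySem.Dict.empty (fun e => e.modify "left" [] (· ++ left))
        let d := d.modify key PySem.Dict.empty (fun e => e.modify "right" [] (· ++ right))
        d.modify key PySem.Dict.empty (fun e => e.modify "all" [] (· ++ pvInterleave left right))) d := by
  intro myidx
  induction myidx with
  | nil => intro d _ _; rfl
  | cons idx rest ih =>
    intro d hinv hpre
    simp only [List.foldl_cons]
    rw [← pv_step_eq mylist g idx d hinv (hpre idx (List.mem_cons_self))]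
    exact ih _ (pv_step_inv mylist g idx d hinv (hpre idx (List.mem_cons_self)))
      (fun j hj => hpre j (List.mem_cons_of_mem _ hj))


theorem DictOfClusters_spec : Claim_equal_DictOfClusters := by
  intro myidx mylist g _dom hpre
  unfold Spec_DictOfClusters DictOfClusters DictOfClusters_alt
  rw [pv_fold_eq mylist g myidx PySem.Dict.empty ⟨by simp, by intro v hv; simp [PySem.Dict.empty, PySem.Dict.values] at hv⟩ hpre]
  rfl
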